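-- pv_equiv track=rewrite | github.com/paiml/depyler | examples/hard_final_conc_semaphore.py | simulate_dining
-- ===== SOURCE A (Python) =====
-- def sem_create(initial_val: int) -> list[int]:
--     """Create semaphore state: [value, num_waiting]."""
--     return [initial_val, 0]
--
-- def sem_wait(sem_state: list[int], wait_queue: list[int], proc_id: int) -> int:
--     """Process attempts to acquire semaphore. Returns 1 if acquired, 0 if blocked."""
--     val: int = sem_state[0]
--     if val > 0:
--         sem_state[0] = val - 1
--         return 1
--     nw: int = sem_state[1]
--     sem_state[1] = nw + 1
--     wait_queue.append(proc_id)
--     return 0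
--
-- def sem_signal(sem_state: list[int], wait_queue: list[int]) -> int:
--     """Signal semaphore. Returns unblocked process id or -1."""
--     nw: int = sem_state[1]
--     if nw > 0:
--         sem_state[1] = nw - 1
--         unblocked: int = wait_queue[0]
--         new_queue: list[int] = []
--         i: int = 1
--         while i < len(wait_queue):
--             qv: int = wait_queue[i]
--             new_queue.append(qv)
--             i = i + 1
--         i2: int = 0
--         while i2 < len(wait_queue):
--             if i2 < len(new_queue):
--                 wait_queue[i2] = new_queue[i2]
--             i2 = i2 + 1
--         while len(wait_queue) > len(new_queue):
--             wait_queue.pop()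
--         return unblocked
--     val: int = sem_state[0]
--     sem_state[0] = val + 1
--     return 0 - 1
--
-- def simulate_dining(num_philosophers: int, num_rounds: int) -> int:
--     """Simulate dining philosophers with a counting semaphore.
--
--     Allow at most (num_philosophers - 1) to eat simultaneously.
--     Returns total meals consumed.
--     """
--     sem_state: list[int] = sem_create(num_philosophers - 1)
--     wait_q: list[int] = []
--     meals: int = 0
--     rnd: int = 0
--     while rnd < num_rounds:
--         phil: int = 0
--         while phil < num_philosophers:
--             acquired: int = sem_wait(sem_state, wait_q, phil)
--             if acquired == 1:
--                 meals = meals + 1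
--                 sem_signal(sem_state, wait_q)
--             phil = phil + 1
--         rnd = rnd + 1
--     return meals
-- ===== SOURCE B (Python) =====
-- def simulate_dining(num_philosophers: int, num_rounds: int) -> int:
--     """Closed form: with >= 2 philosophers the semaphore (capacity n-1) never
--     blocks a philosopher, so every philosopher eats every round; with <= 1
--     philosopher no meal is ever consumed."""
--     if num_philosophers >= 2 and num_rounds > 0:
--         return num_philosophers * num_rounds
--     return 0
-- ===== Notes on version B (the rewrite author's own statement) =====
-- stated objective: faster
-- what changed: Replaced the round-by-round semaphore simulation with the closed form num_philosophers*num_rounds (0 when num_philosophers<2 or num_rounds<=0), proved equal by loop invariants on the semaphore state.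
import Mathlib
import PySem

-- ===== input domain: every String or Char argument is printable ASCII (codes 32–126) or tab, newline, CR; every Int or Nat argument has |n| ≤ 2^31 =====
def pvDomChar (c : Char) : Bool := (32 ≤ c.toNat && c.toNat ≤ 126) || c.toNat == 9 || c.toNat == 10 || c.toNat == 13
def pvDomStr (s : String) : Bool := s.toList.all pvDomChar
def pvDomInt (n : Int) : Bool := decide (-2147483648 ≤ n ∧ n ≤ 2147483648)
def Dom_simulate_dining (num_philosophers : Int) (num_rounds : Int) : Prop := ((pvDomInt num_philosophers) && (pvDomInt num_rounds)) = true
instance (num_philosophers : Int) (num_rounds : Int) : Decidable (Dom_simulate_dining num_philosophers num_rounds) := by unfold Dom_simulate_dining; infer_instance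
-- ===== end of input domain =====

-- B replaces the O(rounds*philosophers) semaphore simulation by its closed form (faster, asymptotic).

-- ===== PORT A =====
-- sem_state [value, num_waiting] is modelled as the pair (value, num_waiting);
-- helpers return the updated state instead of mutating (A's mutation is not observable by the caller).

-- sem_wait: returns (new sem_state, new wait_queue, result)
def pySemWait (sem : Int × Int) (q : List Int) (proc_id : Int) : (Int × Int) × List Int × Int :=
  if sem.1 > 0 then ((sem.1 - 1, sem.2), q, 1)
  else ((sem.1, sem.2 + 1), q ++ [proc_id], 0)

-- while i < len(wait_queue): new_queue.append(wait_queue[i]); i += 1   (index i is in range, so getD is exact)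
def pvSigCollect (q : List Int) (i : Nat) : List Int :=
  if _h : i < q.length then q.getD i 0 :: pvSigCollect q (i + 1) else []
termination_by q.length - i

-- while i2 < len(wait_queue): if i2 < len(new_queue): wait_queue[i2] = new_queue[i2]; i2 += 1
def pvSigOverwrite (q nq : List Int) (i2 : Nat) : List Int :=
  if _h : i2 < q.length then
    pvSigOverwrite (if i2 < nq.length then q.set i2 (nq.getD i2 0) else q) nq (i2 + 1)
  else q
termination_by q.length - i2
decreasing_by split <;> simp_all [List.length_set] <;> omega

-- while len(wait_queue) > len(new_queue): wait_queue.pop()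
def pvSigPop (q : List Int) (m : Nat) : List Int :=
  if _h : m < q.length then pvSigPop q.dropLast m else q
termination_by q.length
decreasing_by simp [List.length_dropLast]; omega

-- sem_signal: returns (new sem_state, new wait_queue, result); wait_queue[0] via getD (callers reach it only with a nonempty queue)
def pySemSignal (sem : Int × Int) (q : List Int) : (Int × Int) × List Int × Int :=
  if sem.2 > 0 then
    let unblocked := q.getD 0 0
    let nq := pvSigCollect q 1
    let q1 := pvSigOverwrite q nq 0
    let q2 := pvSigPop q1 nq.length
    ((sem.1, sem.2 - 1), q2, unblocked)
  else ((sem.1 + 1, sem.2), q, 0 - 1)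

-- inner while phil < num_philosophers
def pvInnerLoop (n : Int) (sem : Int × Int) (q : List Int) (meals phil : Int) : (Int × Int) × List Int × Int :=
  if _h : phil < n then
    let w := pySemWait sem q phil
    if w.2.2 == 1 then
      let s := pySemSignal w.1 w.2.1
      pvInnerLoop n s.1 s.2.1 (meals + 1) (phil + 1)
    else
      pvInnerLoop n w.1 w.2.1 meals (phil + 1)
  else (sem, q, meals)
termination_by (n - phil).toNat
decreasing_by all_goals omega

-- outer while rnd < num_rounds
def pvOuterLoop (n r : Int) (sem : Int × Int) (q : List Int) (meals rnd : Int) : (Int × Int) × List Int × Int :=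
  if _h : rnd < r then
    let s := pvInnerLoop n sem q meals 0
    pvOuterLoop n r s.1 s.2.1 s.2.2 (rnd + 1)
  else (sem, q, meals)
termination_by (r - rnd).toNat
decreasing_by omega

def simulate_dining (num_philosophers : Int) (num_rounds : Int) : Int :=
  (pvOuterLoop num_philosophers num_rounds (num_philosophers - 1, 0) [] 0 0).2.2

-- ===== PORT B =====
def simulate_dining_alt (num_philosophers : Int) (num_rounds : Int) : Int :=
  if 2 ≤ num_philosophers ∧ 0 < num_rounds then num_philosophers * num_rounds else 0

-- ===== PRECONDITION & SPEC =====
def Spec_simulate_dining (num_philosophers : Int) (num_rounds : Int) (out : Int) : Prop := out = simulate_dining_alt num_philosophers num_rounds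
instance (num_philosophers : Int) (num_rounds : Int) (out : Int) : Decidable (Spec_simulate_dining num_philosophers num_rounds out) := by unfold Spec_simulate_dining; infer_instance

-- ===== CLAIM (what is proved, stated in full; the proofs are below) =====
def Claim_equal_simulate_dining : Prop := ∀ (num_philosophers : Int) (num_rounds : Int), Dom_simulate_dining num_philosophers num_rounds → Spec_simulate_dining num_philosophers num_rounds (simulate_dining num_philosophers num_rounds)

-- ===== LEMMAS AND PROOFS =====

-- With n ≥ 2 the semaphore value is n-1 ≥ 1, every wait acquires and every signal restores it.
theorem inner_ge2 (n : Int) (hn : 2 ≤ n) :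
    ∀ (k : Nat) (phil meals : Int), phil + k = n →
      pvInnerLoop n (n - 1, 0) [] meals phil = ((n - 1, 0), [], meals + k) := by
  intro k
  induction k with
  | zero =>
    intro phil meals h
    rw [pvInnerLoop]
    simp at h ⊢
    omega
  | succ k ih =>
    intro phil meals h
    rw [pvInnerLoop]
    have hlt : phil < n := by push_cast at h; omega
    have hpos : n - 1 > 0 := by omega
    simp only [hlt, dif_pos, pySemWait, hpos, if_pos, pySemSignal]
    norm_num
    have := ih (phil + 1) (meals + 1) (by push_cast at h ⊢; omega)
    rw [this]
    simp only [Prod.mk.injEq, true_and]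
    ring

theorem outer_ge2 (n r : Int) (hn : 2 ≤ n) :
    ∀ (k : Nat) (rnd meals : Int), rnd + k = r →
      pvOuterLoop n r (n - 1, 0) [] meals rnd = ((n - 1, 0), [], meals + k * n) := by
  intro k
  induction k with
  | zero =>
    intro rnd meals h
    rw [pvOuterLoop]
    simp at h ⊢
    omega
  | succ k ih =>
    intro rnd meals h
    rw [pvOuterLoop]
    have hlt : rnd < r := by push_cast at h; omega
    simp only [hlt, dif_pos]
    have hin := inner_ge2 n hn n.toNat 0 meals (by omega)
    rw [hin]
    rw [ih (rnd + 1) (meals + n.toNat) (by push_cast at h ⊢; omega)]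
    simp only [Prod.mk.injEq, true_and]
    have : (n.toNat : Int) = n := by omega
    rw [this]
    push_cast
    ring

-- With n ≤ 0 the inner loop body never runs.
theorem inner_nonpos (n : Int) (hn : n ≤ 0) (sem : Int × Int) (q : List Int) (meals : Int) :
    pvInnerLoop n sem q meals 0 = (sem, q, meals) := by
  rw [pvInnerLoop]
  simp
  omega

theorem outer_nonpos (n r : Int) (hn : n ≤ 0) :
    ∀ (k : Nat) (rnd : Int) (sem : Int × Int) (q : List Int) (meals : Int), r - rnd ≤ k →
      pvOuterLoop n r sem q meals rnd = (sem, q, meals) := by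
  intro k
  induction k with
  | zero =>
    intro rnd sem q meals h
    rw [pvOuterLoop]
    simp
    omega
  | succ k ih =>
    intro rnd sem q meals h
    rw [pvOuterLoop]
    by_cases hlt : rnd < r
    · simp only [hlt, dif_pos, inner_nonpos n hn]
      exact ih (rnd + 1) sem q meals (by push_cast at h ⊢; omega)
    · simp [hlt]

-- With n = 1 the single philosopher always blocks: num_waiting grows, meals never does.
theorem inner_one (k : Int) (q : List Int) (meals : Int) :
    pvInnerLoop 1 (0, k) q meals 0 = ((0, k + 1), q ++ [0], meals) := by
  rw [pvInnerLoop]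
  norm_num [pySemWait]
  rw [pvInnerLoop]
  norm_num

theorem outer_one (r : Int) :
    ∀ (fuel : Nat) (rnd k : Int) (q : List Int) (meals : Int), r - rnd ≤ fuel →
      (pvOuterLoop 1 r (0, k) q meals rnd).2.2 = meals := by
  intro fuel
  induction fuel with
  | zero =>
    intro rnd k q meals h
    have hnl : ¬ rnd < r := by omega
    rw [pvOuterLoop]
    simp [hnl]
  | succ fuel ih =>
    intro rnd k q meals h
    rw [pvOuterLoop]
    by_cases hlt : rnd < r
    · simp only [hlt, dif_pos, inner_one]
      exact ih (rnd + 1) (k + 1) (q ++ [0]) meals (by push_cast at h ⊢; omega)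
    · simp [hlt]

-- ===== VERDICT (by name: the statement is the Claim_ definition above) =====
theorem simulate_dining_spec : Claim_equal_simulate_dining := by
  intro n r _
  unfold Spec_simulate_dining simulate_dining simulate_dining_alt
  by_cases hr : 0 < r
  · by_cases hn2 : 2 ≤ n
    · rw [outer_ge2 n r hn2 r.toNat 0 0 (by omega), if_pos ⟨hn2, hr⟩]
      show (0 : Int) + ↑r.toNat * n = n * r
      have hrr : (r.toNat : Int) = r := by omega
      rw [hrr]; ring
    · rw [if_neg (by tauto)]
      by_cases h1 : n = 1
      · subst h1
        have := outer_one r r.toNat 0 0 [] 0 (by omega)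
        norm_num at this ⊢
        exact this
      · rw [outer_nonpos n r (by omega) r.toNat 0 (n - 1, 0) [] 0 (by omega)]
  · rw [pvOuterLoop]
    have hnl : ¬ (0 : Int) < r := hr
    simp [hnl]
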